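-- pv_equiv track=rewrite | github.com/Bleyddyn/malpi | tf/drive_train.py | embedActions
-- ===== SOURCE A (Python) =====
-- def embedActions( actions ):
--     embedding = { "stop":0, "forward":1, "left":2, "right":3, "backward":4 }
--     emb = []
--     prev_act = 0
--     for act in actions:
--         if not act.startswith("speed"):
--             prev_act = embedding[act]
--             emb.append( embedding[act] )
--         else:
--             emb.append( prev_act )
--     return emb
-- ===== SOURCE B (Python) =====
-- def embedActions(actions):
--     # Different algorithm: no carried state. For each position i, scan backwards
--     # from i for the nearest action that is not a "speed" entry and return its
--     # embedding code (0 if none exists before it).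
--     embedding = {"stop": 0, "forward": 1, "left": 2, "right": 3, "backward": 4}
--
--     def codeAt(j):
--         while True:
--             act = actions[j]
--             if not act.startswith("speed"):
--                 return embedding[act]
--             if j == 0:
--                 return 0
--             j -= 1
--
--     return [codeAt(i) for i in range(len(actions))]
-- ===== Notes on version B (the rewrite author's own statement) =====
-- stated objective: alternative
-- what changed: A's single left-to-right pass carrying prev_act is replaced by a stateless per-index computation: for every position a backward scan finds the nearest non-'speed' action and returns its embedding code (0 if none), so the output is a map over indices with no carried accumulator.
import Mathlib
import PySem

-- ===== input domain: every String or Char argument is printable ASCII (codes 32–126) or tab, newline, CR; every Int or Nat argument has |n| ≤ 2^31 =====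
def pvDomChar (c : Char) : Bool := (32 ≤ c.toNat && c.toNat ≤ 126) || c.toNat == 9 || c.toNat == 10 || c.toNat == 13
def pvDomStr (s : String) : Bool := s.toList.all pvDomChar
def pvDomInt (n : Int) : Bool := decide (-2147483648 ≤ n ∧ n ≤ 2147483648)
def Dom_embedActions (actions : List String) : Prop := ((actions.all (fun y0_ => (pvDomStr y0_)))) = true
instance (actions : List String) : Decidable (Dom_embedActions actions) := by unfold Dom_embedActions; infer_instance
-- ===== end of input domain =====

-- B replaces A's carried-state single pass by a stateless per-index backward scan for the nearest non-"speed" action; alternative decomposition, same result.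


-- ===== PORT A =====
-- the embedding dict literal shared by both Pythons
def pvEmbedding : PySem.Dict String Int :=
  PySem.Dict.ofList [("stop", 0), ("forward", 1), ("left", 2), ("right", 3), ("backward", 4)]

-- A's loop body: carries (prev_act, emb); Python raises KeyError where get? is none —
-- exactly those inputs are excluded by Pre_ (the getD 0 value is never claimed there).
def pvStepA (st : Int × List Int) (act : String) : Int × List Int :=
  if ¬ PySem.Str.startswith act "speed" then
    ((pvEmbedding.get? act).getD 0, st.2 ++ [(pvEmbedding.get? act).getD 0])
  else
    (st.1, st.2 ++ [st.1])

def embedActions (actions : List String) : List Int :=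
  (actions.foldl pvStepA (0, [])).2

-- ===== PORT B =====
-- B's backward scan from index j: the index is always in range in B (j ≤ i < length),
-- so getD with "" is exact for actions[j] here.
def pvCodeAt (actions : List String) : Nat → Int
  | 0 =>
    let act := actions.getD 0 ""
    if ¬ PySem.Str.startswith act "speed" then (pvEmbedding.get? act).getD 0 else 0
  | k + 1 =>
    let act := actions.getD (k + 1) ""
    if ¬ PySem.Str.startswith act "speed" then (pvEmbedding.get? act).getD 0
    else pvCodeAt actions k

def embedActions_alt (actions : List String) : List Int :=
  (List.range actions.length).map (pvCodeAt actions)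

-- ===== PRECONDITION & SPEC =====
-- Pre_ excludes exactly the inputs where the Python A raises KeyError: a non-"speed…" action not in the dict.
def Pre_embedActions (actions : List String) : Prop :=
  (actions.all (fun a => PySem.Str.startswith a "speed" || (pvEmbedding.get? a).isSome)) = true
instance (actions : List String) : Decidable (Pre_embedActions actions) := by unfold Pre_embedActions; infer_instance
def pvWitness_embedActions : List String := ["forward", "speed0.3", "left", "stop"]

def Spec_embedActions (actions : List String) (out : List Int) : Prop := out = embedActions_alt actions
instance (actions : List String) (out : List Int) : Decidable (Spec_embedActions actions out) := by unfold Spec_embedActions; infer_instance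

-- ===== CLAIM (what is proved, stated in full; the proofs are below) =====
def Claim_equal_embedActions : Prop := ∀ (actions : List String), Dom_embedActions actions → Pre_embedActions actions → Spec_embedActions actions (embedActions actions)

-- ===== LEMMAS AND PROOFS =====
-- unfolding lemmas for the backward scan
theorem pvCodeAt_hit (acts : List String) (j : Nat)
    (h : ¬ PySem.Str.startswith (acts.getD j "") "speed" = true) :
    pvCodeAt acts j = (pvEmbedding.get? (acts.getD j "")).getD 0 := by
  cases j <;> simp only [pvCodeAt] <;> rw [if_pos h]

theorem pvCodeAt_miss_zero (acts : List String)
    (h : PySem.Str.startswith (acts.getD 0 "") "speed" = true) :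
    pvCodeAt acts 0 = 0 := by
  simp only [pvCodeAt]; rw [if_neg (by simpa using h)]

theorem pvCodeAt_miss_succ (acts : List String) (k : Nat)
    (h : PySem.Str.startswith (acts.getD (k + 1) "") "speed" = true) :
    pvCodeAt acts (k + 1) = pvCodeAt acts k := by
  simp only [pvCodeAt]; rw [if_neg (by simpa using h)]

-- the backward scan only inspects indices ≤ j, so appending on the right does not change it
theorem pvCodeAt_append (l : List String) (a : String) (j : Nat) (hj : j < l.length) :
    pvCodeAt (l ++ [a]) j = pvCodeAt l j := by
  have hg : ∀ i : Nat, i < l.length → (l ++ [a]).getD i "" = l.getD i "" := by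
    intro i hi
    simp [List.getD, List.getElem?_append_left hi]
  induction j with
  | zero => simp only [pvCodeAt, hg 0 hj]
  | succ k ih =>
    simp only [pvCodeAt, hg (k + 1) hj]
    split
    · rfl
    · exact ih (Nat.lt_of_succ_lt hj)

theorem pv_getD_last (l : List String) (a : String) : (l ++ [a]).getD l.length "" = a := by
  simp [List.getD]

-- A's accumulator shift: snd of the fold from (p, acc) is acc ++ snd of the fold from (p, [])
theorem pvFoldA_acc (l : List String) (p : Int) (acc : List Int) :
    (l.foldl pvStepA (p, acc)).2 = acc ++ (l.foldl pvStepA (p, [])).2 := by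
  induction l generalizing p acc with
  | nil => simp
  | cons a rest ih =>
    simp only [List.foldl_cons, pvStepA]
    split
    · rw [ih, ih _ ([] ++ _)]; simp
    · rw [ih, ih _ ([] ++ _)]; simp

-- A's carried prev equals B's backward scan from the last index
theorem pvFoldA_fst (l : List String) :
    (l.foldl pvStepA (0, [])).1 = pvCodeAt l (l.length - 1) := by
  induction l using List.reverseRecOn with
  | nil => decide
  | append_singleton l a ih =>
    rw [List.foldl_append, List.foldl_cons, List.foldl_nil]
    have hlen : (l ++ [a]).length - 1 = l.length := by simp
    rw [hlen]
    by_cases h : PySem.Str.startswith a "speed" = true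
    · rw [pvStepA, if_neg (by simpa using h)]
      cases l with
      | nil =>
        simp only [List.foldl_nil, List.nil_append, List.length_nil]
        exact (pvCodeAt_miss_zero _ (by simpa [pv_getD_last [] a] using h)).symm
      | cons b bs =>
        simp only [List.length_cons]
        rw [pvCodeAt_miss_succ _ _ (by simpa [pv_getD_last (b :: bs) a] using h),
          pvCodeAt_append _ _ _ (by simp)]
        simpa using ih
    · rw [pvStepA, if_pos (by simpa using h)]
      rw [pvCodeAt_hit _ _ (by rw [pv_getD_last]; simpa using h), pv_getD_last]

theorem pv_main (l : List String) : embedActions l = embedActions_alt l := by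
  induction l using List.reverseRecOn with
  | nil => rfl
  | append_singleton l a ih =>
    unfold embedActions embedActions_alt at *
    rw [List.foldl_append, List.foldl_cons, List.foldl_nil]
    simp only [List.length_append, List.length_cons, List.length_nil, Nat.zero_add,
      List.range_succ, List.map_append, List.map_cons, List.map_nil]
    have hmap : (List.range l.length).map (pvCodeAt (l ++ [a]))
        = (List.range l.length).map (pvCodeAt l) := by
      apply List.map_congr_left
      intro j hj
      exact pvCodeAt_append l a j (List.mem_range.mp hj)
    rw [hmap]
    by_cases h : PySem.Str.startswith a "speed" = true
    · rw [pvStepA, if_neg (by simpa using h)]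
      simp only []
      rw [pvFoldA_acc, ih, pvFoldA_fst]
      cases l with
      | nil =>
        simp only [List.length_nil, List.range_zero, List.map_nil, List.nil_append]
        rw [pvCodeAt_miss_zero [a] (by simpa using h)]
        decide
      | cons b bs =>
        simp only [List.length_cons]
        rw [pvCodeAt_miss_succ _ _ (by simpa [pv_getD_last (b :: bs) a] using h),
          pvCodeAt_append _ _ _ (by simp)]
        simp
    · rw [pvStepA, if_pos (by simpa using h)]
      simp only []
      rw [pvFoldA_acc, ih,
        pvCodeAt_hit _ _ (by rw [pv_getD_last]; simpa using h), pv_getD_last]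
      simp

-- ===== VERDICT (by name: the statement is the Claim_ definition above) =====
theorem embedActions_spec : Claim_equal_embedActions := by
  intro actions _ _
  exact pv_main actions
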